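-- pv_equiv track=rewrite | github.com/paulmetzger/Device-Hopping-Paper | source_to_source_translator/translator.py | utils_extract_function_parameters
-- ===== SOURCE A (Python) =====
-- from typing import Dict, List, Set, Tuple
--
-- def utils_extract_function_parameters(start_position_in_code: int, code: str) -> List[str]:
--     parameters = []
--     s = e = start_position_in_code
--     unmatched_open_braces = 0
--     while code[e if e == 0 else e - 1] != ')' or unmatched_open_braces != 0:
--         if code[e] == ')':
--             unmatched_open_braces -= 1
--         elif code[e] == '(':
--             if unmatched_open_braces == 0:
--                 s = e + 1
--             unmatched_open_braces += 1
--         if unmatched_open_braces == 1 and code[e] == ',':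
--             parameters.append(code[s:e].strip())
--             s = e + 1
--         e += 1
--     parameters.append(code[s:e-1].strip())
--     return parameters
-- ===== SOURCE B (Python) =====
-- def utils_extract_function_parameters(start_position_in_code: int, code: str):
--     # Phase 1: locate the span of the parameter list (last top-level '(' .. its ')').
--     s = e = start_position_in_code
--     depth = 0
--     while code[e if e == 0 else e - 1] != ')' or depth != 0:
--         c = code[e]
--         if c == ')':
--             depth -= 1
--         elif c == '(':
--             if depth == 0:
--                 s = e + 1
--             depth += 1
--         e += 1
--     inner = code[s:e - 1]
--     # Phase 2: split the inner text at depth-0 commas, stripping each field.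
--     fields = []
--     cur = []
--     d = 0
--     for c in inner:
--         if c == '(':
--             d += 1
--             cur.append(c)
--         elif c == ')':
--             d -= 1
--             cur.append(c)
--         elif c == ',' and d == 0:
--             fields.append(''.join(cur).strip())
--             cur = []
--         else:
--             cur.append(c)
--     fields.append(''.join(cur).strip())
--     return fields
-- ===== Notes on version B (the rewrite author's own statement) =====
-- stated objective: alternative
-- what changed: A's single incremental state machine (tracking slice start, depth and an output list at once) is split into two passes: a locate phase that finds the span of the parameter list, then a separate accumulator-based splitter that cuts the inner text at depth-0 commas.
-- outside the precondition, e.g. on utils_extract_function_parameters(0, ')(a,b)'): A returns [')(a,b'], B returns [')(a', 'b']; on utils_extract_function_parameters(-2, '),,,'): A returns [','], B returns ['', '']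
import Mathlib
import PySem

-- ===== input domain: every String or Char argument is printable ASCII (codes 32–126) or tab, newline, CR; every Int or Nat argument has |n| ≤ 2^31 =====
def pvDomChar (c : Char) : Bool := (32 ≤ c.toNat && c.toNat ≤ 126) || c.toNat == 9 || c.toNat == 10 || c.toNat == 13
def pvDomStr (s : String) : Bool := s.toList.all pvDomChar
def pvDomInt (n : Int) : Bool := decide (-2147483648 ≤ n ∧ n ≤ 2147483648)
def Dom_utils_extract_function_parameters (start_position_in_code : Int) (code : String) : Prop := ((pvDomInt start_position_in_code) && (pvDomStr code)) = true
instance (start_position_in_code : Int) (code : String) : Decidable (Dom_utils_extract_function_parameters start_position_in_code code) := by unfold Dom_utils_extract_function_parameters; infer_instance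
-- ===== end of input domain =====

-- B splits A's single incremental state machine into two phases: locate the parameter
-- span, then split that substring at depth-0 commas (objective: alternative decomposition).

-- shared atom: Python's str.strip() on a chunk of characters
def pvStrip (cs : List Char) : String := String.ofList (PySem.Chars.strip cs)

-- ===== PORT A =====
-- the while loop of A; fuel-bounded recursion, [] only on IndexError / fuel exhaustion
def aLoop (lc : List Char) (ps : List String) (s e d : Int) : Nat → List String
  | 0 => []
  | fuel + 1 =>
    match PySem.List.pyGet? lc (if e = 0 then e else e - 1) with
    | none => []          -- IndexError evaluating the guard
    | some g =>
      if g = ')' ∧ d = 0 then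
        ps ++ [pvStrip (PySem.List.slice lc (some s) (some (e - 1)))]
      else
        match PySem.List.pyGet? lc e with
        | none => []      -- IndexError reading code[e]
        | some c =>
          let s1 := if c = ')' then s else if c = '(' then (if d = 0 then e + 1 else s) else s
          let d1 := if c = ')' then d - 1 else if c = '(' then d + 1 else d
          if d1 = 1 ∧ c = ',' then
            aLoop lc (ps ++ [pvStrip (PySem.List.slice lc (some s1) (some e))]) (e + 1) (e + 1) d1 fuel
          else
            aLoop lc ps s1 (e + 1) d1 fuel

def utils_extract_function_parameters (start_position_in_code : Int) (code : String) : List String :=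
  let lc := code.toList
  aLoop lc [] start_position_in_code start_position_in_code 0
    (lc.length + 1 + (-start_position_in_code).toNat)

-- ===== PORT B =====
-- phase 1 of B: locate the span (s, e); none only on IndexError / fuel exhaustion
def bScan (lc : List Char) (s e d : Int) : Nat → Option (Int × Int)
  | 0 => none
  | fuel + 1 =>
    match PySem.List.pyGet? lc (if e = 0 then e else e - 1) with
    | none => none
    | some g =>
      if g = ')' ∧ d = 0 then some (s, e)
      else
        match PySem.List.pyGet? lc e with
        | none => none
        | some c =>
          let s1 := if c = '(' ∧ d = 0 then e + 1 else s
          let d1 := if c = ')' then d - 1 else if c = '(' then d + 1 else d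
          bScan lc s1 (e + 1) d1 fuel

-- phase 2 of B: split the inner text at depth-0 commas
def bSplit (fields : List String) (cur : List Char) (d : Int) : List Char → List String
  | [] => fields ++ [pvStrip cur]
  | c :: rest =>
    if c = '(' then bSplit fields (cur ++ [c]) (d + 1) rest
    else if c = ')' then bSplit fields (cur ++ [c]) (d - 1) rest
    else if c = ',' ∧ d = 0 then bSplit (fields ++ [pvStrip cur]) [] d rest
    else bSplit fields (cur ++ [c]) d rest

def utils_extract_function_parameters_alt (start_position_in_code : Int) (code : String) : List String :=
  let lc := code.toList
  match bScan lc start_position_in_code start_position_in_code 0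
      (lc.length + 1 + (-start_position_in_code).toNat) with
  | none => []
  | some (s, e) => bSplit [] [] 0 (PySem.List.slice lc (some s) (some (e - 1)))

-- ===== PRECONDITION & SPEC =====
-- Pre_ excludes inputs where A raises IndexError (no balanced ')' ahead of start), and two
-- corners where A's returned value is an accident of its indexing that B need not share:
-- a negative start position that does not exit immediately (Python wraparound scanning) and
-- start = 0 on code beginning with ')' (A returns the unsplit negative slice code[0:-1]).
def pvBal (xs : List Char) : Int := (xs.count '(' : Int) - (xs.count ')' : Int)

def Pre_utils_extract_function_parameters (start_position_in_code : Int) (code : String) : Prop :=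
  let lc := code.toList
  (start_position_in_code < 0 ∧
      PySem.List.pyGet? lc (start_position_in_code - 1) = some ')')
  ∨ (0 < start_position_in_code ∧ start_position_in_code ≤ (lc.length : Int) ∧
      lc[(start_position_in_code - 1).toNat]? = some ')')
  ∨ (0 ≤ start_position_in_code ∧
      ¬ (start_position_in_code = 0 ∧ lc[0]? = some ')') ∧
      ∃ j : Fin lc.length, start_position_in_code ≤ (j : Int) ∧ lc[j] = ')' ∧
        pvBal (PySem.List.slice lc (some start_position_in_code) (some ((j : Int) + 1))) = 0)
  ∨ (start_position_in_code < 0 ∧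
      ∃ j : Fin lc.length, start_position_in_code < (j : Int) + 1 - lc.length ∧
        (j : Int) + 1 - lc.length ≤ -1 ∧ lc[j] = ')' ∧
        pvBal (PySem.List.slice lc (some start_position_in_code)
          (some ((j : Int) + 1 - lc.length))) = 0)

instance (start_position_in_code : Int) (code : String) : Decidable (Pre_utils_extract_function_parameters start_position_in_code code) := by unfold Pre_utils_extract_function_parameters; infer_instance

def pvWitness_utils_extract_function_parameters : Int × String := (0, "f(a, b(c), d)")

def Spec_utils_extract_function_parameters (start_position_in_code : Int) (code : String) (out : List String) : Prop := out = utils_extract_function_parameters_alt start_position_in_code code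
instance (start_position_in_code : Int) (code : String) (out : List String) : Decidable (Spec_utils_extract_function_parameters start_position_in_code code out) := by unfold Spec_utils_extract_function_parameters; infer_instance

-- ===== CLAIM (what is proved, stated in full; the proofs are below) =====
def Claim_equal_utils_extract_function_parameters : Prop := ∀ (start_position_in_code : Int) (code : String), Dom_utils_extract_function_parameters start_position_in_code code → Pre_utils_extract_function_parameters start_position_in_code code → Spec_utils_extract_function_parameters start_position_in_code code (utils_extract_function_parameters start_position_in_code code)

-- ===== LEMMAS AND PROOFS =====

-- a successful pyGet? means the index is in Python range
theorem pyGet?_some_range (lc : List Char) (i : Int) (c : Char)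
    (h : PySem.List.pyGet? lc i = some c) : -(lc.length : Int) ≤ i ∧ i < lc.length := by
  have h1 : ¬ (PySem.List.pyGet? lc i = none) := by rw [h]; simp
  rw [PySem.List.pyGet?_eq_none_iff] at h1
  have h2 := not_not.mp h1
  simpa [PySem.Raise.InRange] using h2

-- pyGet? at a negative in-range index reads the wrapped position
theorem pyGet?_neg_eq (lc : List Char) (i : Int) (h1 : -(lc.length : Int) ≤ i) (h2 : i ≤ -1) :
    PySem.List.pyGet? lc i = lc[((lc.length : Int) + i).toNat]? := by
  have hk : i = -(((-i).toNat : Nat) : Int) := by omega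
  rw [hk, PySem.List.pyGet?_neg_natCast lc (-i).toNat (by omega) (by omega)]
  congr 1
  omega

-- a successful scan never moves left
theorem bScan_ge (lc : List Char) : ∀ (f : Nat) (s e d s2 e2 : Int),
    bScan lc s e d f = some (s2, e2) → e ≤ e2 := by
  intro f
  induction f with
  | zero => intro s e d s2 e2 h; simp [bScan] at h
  | succ f ih =>
    intro s e d s2 e2 h
    simp only [bScan] at h
    rcases hg : PySem.List.pyGet? lc (if e = 0 then e else e - 1) with _ | g <;>
      simp only [hg] at h
    · simp at h
    split_ifs at h with hx
    · obtain ⟨rfl, rfl⟩ := h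
      exact le_refl _
    · rcases hc : PySem.List.pyGet? lc e with _ | c <;> simp only [hc] at h
      · simp at h
      have := ih _ _ _ _ _ h
      omega

-- from depth ≥ 1 the scan cannot stop at once
theorem bScan_ge_succ (lc : List Char) (f : Nat) (s e d s2 e2 : Int) (hd : 1 ≤ d)
    (h : bScan lc s e d f = some (s2, e2)) : e + 1 ≤ e2 := by
  cases f with
  | zero => simp [bScan] at h
  | succ f =>
    simp only [bScan] at h
    rcases hg : PySem.List.pyGet? lc (if e = 0 then e else e - 1) with _ | g <;>
      simp only [hg] at h
    · simp at h
    have hng : ¬ (g = ')' ∧ d = 0) := by rintro ⟨-, h2⟩; omega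
    rw [if_neg hng] at h
    rcases hc : PySem.List.pyGet? lc e with _ | c <;> simp only [hc] at h
    · simp at h
    exact bScan_ge lc f _ _ _ _ _ h

-- while depth ≥ 1 the s component just rides along
theorem bScan_s_const (lc : List Char) : ∀ (f : Nat) (s s' e d s2 e2 : Int), 1 ≤ d →
    (0 ≤ e ∨ e2 ≤ -1) → bScan lc s' e d f = some (s2, e2) →
    bScan lc s e d f = some (s, e2) := by
  intro f
  induction f with
  | zero => intro s s' e d s2 e2 hd hr hb; simp [bScan] at hb
  | succ f ih =>
    intro s s' e d s2 e2 hd hr hb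
    simp only [bScan] at hb ⊢
    rcases hg : PySem.List.pyGet? lc (if e = 0 then e else e - 1) with _ | g <;>
      simp only [hg] at hb ⊢
    · simp at hb
    have hng : ¬ (g = ')' ∧ d = 0) := by rintro ⟨-, h2⟩; omega
    simp only [if_neg hng] at hb ⊢
    rcases hc : PySem.List.pyGet? lc e with _ | c <;> simp only [hc] at hb ⊢
    · simp at hb
    have hno : ¬ (c = '(' ∧ d = 0) := by rintro ⟨-, h2⟩; omega
    simp only [if_neg hno] at hb ⊢
    by_cases hcp : c = ')'
    · by_cases hd1 : d = 1
      · subst hd1; subst hcp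
        norm_num at hb ⊢
        have hne : ¬ (e + 1 = 0) := by
          rcases hr with hr | hr
          · omega
          · have := bScan_ge lc f _ _ _ _ _ hb
            omega
        cases f with
        | zero => simp [bScan] at hb
        | succ f' =>
          simp only [bScan] at hb ⊢
          rw [if_neg hne] at hb ⊢
          have he1 : e + 1 - 1 = e := by omega
          rw [he1, hc] at hb ⊢
          norm_num at hb ⊢
          omega
      · have hd' : (1:Int) ≤ if c = ')' then d - 1 else if c = '(' then d + 1 else d := by
          simp only [if_pos hcp]; omega
        exact ih s _ (e + 1) _ s2 e2 hd'
          (by rcases hr with hr | hr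
              exacts [Or.inl (by omega), Or.inr hr]) hb
    · have hd' : (1:Int) ≤ if c = ')' then d - 1 else if c = '(' then d + 1 else d := by
        rw [if_neg hcp]; split_ifs <;> omega
      exact ih s _ (e + 1) _ s2 e2 hd'
        (by rcases hr with hr | hr
            exacts [Or.inl (by omega), Or.inr hr]) hb

-- empty Python slices
theorem slice_nil' (lc : List Char) (e : Int) :
    PySem.List.slice lc (some e) (some e) = [] := by
  simp only [PySem.List.slice, PySem.List.clampIdx]
  split_ifs <;> first | rfl | (rw [List.take_eq_nil_iff]; exact Or.inl (by omega)) | (exfalso; omega)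

theorem slice_back_nil (lc : List Char) (s : Int) (h : s ≠ 0) :
    PySem.List.slice lc (some s) (some (s - 1)) = [] := by
  rcases Int.lt_or_le s 0 with hneg | hpos
  · simp only [PySem.List.slice, PySem.List.clampIdx]
    split_ifs <;> try rfl
    all_goals rw [List.take_eq_nil_iff]
    all_goals exact Or.inl (by omega)
  · rw [PySem.List.slice_toNat lc hpos (by omega)]
    rw [List.take_eq_nil_iff]
    exact Or.inl (by omega)

-- a fully negative slice in drop/take form
theorem slice_neg_repr (lc : List Char) (a b : Int) (ha : -(lc.length : Int) ≤ a)
    (hb : b ≤ -1) (hab : a ≤ b) :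
    PySem.List.slice lc (some a) (some b) =
      (lc.drop ((lc.length : Int) + a).toNat).take
        (((lc.length : Int) + b).toNat - ((lc.length : Int) + a).toNat) := by
  simp only [PySem.List.slice, PySem.List.clampIdx]
  split_ifs <;> (congr 1 <;> omega)

-- extending a slice by its next character (either sign regime)
theorem slice_snoc' (lc : List Char) (s e : Int) (c : Char)
    (hc : PySem.List.pyGet? lc e = some c) (hse : s ≤ e)
    (hr : 0 ≤ s ∨ (-(lc.length : Int) ≤ s ∧ e ≤ -2)) :
    PySem.List.slice lc (some s) (some (e + 1)) =
      PySem.List.slice lc (some s) (some e) ++ [c] := by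
  obtain ⟨hlo, hhi⟩ := pyGet?_some_range lc e c hc
  rcases hr with h0 | ⟨hsl, hneg⟩
  · have he0 : 0 ≤ e := le_trans h0 hse
    rw [PySem.List.pyGet?_of_nonneg lc he0] at hc
    have helen : e.toNat < lc.length := (List.getElem?_eq_some_iff.mp hc).1
    have hcval : lc[e.toNat] = c := (List.getElem?_eq_some_iff.mp hc).2
    rw [PySem.List.slice_toNat lc h0 (by omega), PySem.List.slice_toNat lc h0 (by omega)]
    have h1 : (e + 1).toNat - s.toNat = (e.toNat - s.toNat) + 1 := by omega
    rw [h1, List.take_add_one]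
    congr 1
    have h2 : (lc.drop s.toNat)[e.toNat - s.toNat]? = some lc[e.toNat] := by
      rw [List.getElem?_drop]
      have h3 : s.toNat + (e.toNat - s.toNat) = e.toNat := by omega
      rw [h3, List.getElem?_eq_getElem helen]
    rw [h2, hcval]; rfl
  · -- negative regime: both bounds clamp to length + index
    rw [pyGet?_neg_eq lc e hlo (by omega)] at hc
    have hcval : lc[((lc.length : Int) + e).toNat] = c := (List.getElem?_eq_some_iff.mp hc).2
    have hA : PySem.List.slice lc (some s) (some (e + 1)) =
        (lc.drop ((lc.length : Int) + s).toNat).take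
          (((lc.length : Int) + (e + 1)).toNat - ((lc.length : Int) + s).toNat) :=
      slice_neg_repr lc s (e + 1) hsl (by omega) (by omega)
    have hB : PySem.List.slice lc (some s) (some e) =
        (lc.drop ((lc.length : Int) + s).toNat).take
          (((lc.length : Int) + e).toNat - ((lc.length : Int) + s).toNat) :=
      slice_neg_repr lc s e hsl (by omega) (by omega)
    rw [hA, hB]
    have h1 : ((lc.length : Int) + (e + 1)).toNat - ((lc.length : Int) + s).toNat =
        (((lc.length : Int) + e).toNat - ((lc.length : Int) + s).toNat) + 1 := by omega
    rw [h1, List.take_add_one]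
    congr 1
    have hlt2 : ((lc.length : Int) + e).toNat < lc.length := by omega
    have h2 : (lc.drop ((lc.length : Int) + s).toNat)[((lc.length : Int) + e).toNat -
        ((lc.length : Int) + s).toNat]? = some lc[((lc.length : Int) + e).toNat] := by
      rw [List.getElem?_drop]
      have h3 : ((lc.length : Int) + s).toNat + (((lc.length : Int) + e).toNat -
          ((lc.length : Int) + s).toNat) = ((lc.length : Int) + e).toNat := by omega
      rw [h3, List.getElem?_eq_getElem hlt2]
    rw [h2, hcval]; rfl

-- peeling the first character off a slice (either sign regime)
theorem slice_cons' (lc : List Char) (e m : Int) (c : Char)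
    (hc : PySem.List.pyGet? lc e = some c) (hm : e < m)
    (hr : 0 ≤ e ∨ m ≤ -1) :
    PySem.List.slice lc (some e) (some m) =
      c :: PySem.List.slice lc (some (e + 1)) (some m) := by
  obtain ⟨hlo, hhi⟩ := pyGet?_some_range lc e c hc
  rcases hr with h0 | hneg
  · rw [PySem.List.pyGet?_of_nonneg lc h0] at hc
    have helen : e.toNat < lc.length := (List.getElem?_eq_some_iff.mp hc).1
    have hcval : lc[e.toNat] = c := (List.getElem?_eq_some_iff.mp hc).2
    rw [PySem.List.slice_toNat lc h0 (by omega), PySem.List.slice_toNat lc (by omega) (by omega)]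
    have h1 : m.toNat - e.toNat = (m.toNat - (e + 1).toNat) + 1 := by omega
    rw [h1, List.drop_eq_getElem_cons helen]
    have h2 : (e + 1).toNat = e.toNat + 1 := by omega
    rw [h2, List.take_succ_cons, hcval]
  · -- negative regime
    rw [pyGet?_neg_eq lc e hlo (by omega)] at hc
    have hcval : lc[((lc.length : Int) + e).toNat] = c := (List.getElem?_eq_some_iff.mp hc).2
    have hA : PySem.List.slice lc (some e) (some m) =
        (lc.drop ((lc.length : Int) + e).toNat).take
          (((lc.length : Int) + m).toNat - ((lc.length : Int) + e).toNat) :=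
      slice_neg_repr lc e m hlo hneg (by omega)
    have hB : PySem.List.slice lc (some (e + 1)) (some m) =
        (lc.drop ((lc.length : Int) + (e + 1)).toNat).take
          (((lc.length : Int) + m).toNat - ((lc.length : Int) + (e + 1)).toNat) :=
      slice_neg_repr lc (e + 1) m (by omega) hneg (by omega)
    rw [hA, hB]
    have h1 : ((lc.length : Int) + m).toNat - ((lc.length : Int) + e).toNat =
        (((lc.length : Int) + m).toNat - ((lc.length : Int) + (e + 1)).toNat) + 1 := by omega
    rw [h1, List.drop_eq_getElem_cons (by omega : ((lc.length : Int) + e).toNat < lc.length)]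
    have h2 : ((lc.length : Int) + (e + 1)).toNat = ((lc.length : Int) + e).toNat + 1 := by omega
    rw [h2, List.take_succ_cons, hcval]

-- the fields accumulator of bSplit is a plain prefix
theorem bSplit_append (l : List Char) : ∀ (fs gs : List String) (cur : List Char) (d : Int),
    bSplit (fs ++ gs) cur d l = fs ++ bSplit gs cur d l := by
  induction l with
  | nil => intro fs gs cur d; simp [bSplit]
  | cons c rest ih =>
    intro fs gs cur d
    simp only [bSplit]
    split_ifs <;> simp [ih, List.append_assoc]

-- if the scan errors out, A's loop returns [] too (identical control)
theorem aLoop_none (lc : List Char) : ∀ (f : Nat) (ps : List String) (s s' e d : Int),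
    bScan lc s' e d f = none → aLoop lc ps s e d f = [] := by
  intro f
  induction f with
  | zero => intro ps s s' e d hb; simp [aLoop]
  | succ f ih =>
    intro ps s s' e d hb
    simp only [aLoop]
    simp only [bScan] at hb
    rcases hg : PySem.List.pyGet? lc (if e = 0 then e else e - 1) with _ | g
    · simp only [hg]
    simp only [hg] at hb ⊢
    by_cases hx : g = ')' ∧ d = 0
    · rw [if_pos hx] at hb; exact absurd hb (by simp)
    simp only [if_neg hx] at hb ⊢
    rcases hc : PySem.List.pyGet? lc e with _ | c
    · simp only [hc]
    simp only [hc] at hb ⊢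
    by_cases hcm : (if c = ')' then d - 1 else if c = '(' then d + 1 else d) = 1 ∧ c = ','
    · rw [if_pos hcm]; exact ih _ _ _ _ _ hb
    · rw [if_neg hcm]; exact ih _ _ _ _ _ hb

-- the first exit the scan can take bounds its result
theorem bScan_exit_le (lc : List Char) : ∀ (f : Nat) (s e d p s2 e2 : Int),
    e ≤ p → p ≤ -1 → PySem.List.pyGet? lc (p - 1) = some ')' →
    d + pvBal (PySem.List.slice lc (some e) (some p)) = 0 →
    bScan lc s e d f = some (s2, e2) → e2 ≤ p := by
  intro f
  induction f with
  | zero => intro s e d p s2 e2 _ _ _ _ hb; simp [bScan] at hb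
  | succ f ih =>
    intro s e d p s2 e2 hep hp hpg hbal hb
    simp only [bScan] at hb
    rcases hg : PySem.List.pyGet? lc (if e = 0 then e else e - 1) with _ | g <;>
      simp only [hg] at hb
    · simp at hb
    by_cases hx : g = ')' ∧ d = 0
    · rw [if_pos hx] at hb
      obtain ⟨-, rfl⟩ := Prod.mk.injEq .. ▸ (Option.some.inj hb)
      exact hep
    rw [if_neg hx] at hb
    rcases hc : PySem.List.pyGet? lc e with _ | c <;> simp only [hc] at hb
    · simp at hb
    by_cases heq : e = p
    · -- at p the guard would have fired: contradiction
      exfalso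
      subst heq
      rw [slice_nil'] at hbal
      simp [pvBal] at hbal
      rw [if_neg (by omega : ¬ e = 0), hpg] at hg
      exact hx ⟨(Option.some.inj hg).symm, by omega⟩
    · have hlt : e < p := lt_of_le_of_ne hep heq
      have hcons := slice_cons' lc e p c hc hlt (Or.inr hp)
      rw [hcons] at hbal
      refine ih _ (e + 1) _ p s2 e2 (by omega) hp hpg ?_ hb
      by_cases h1 : c = ')'
      · subst h1
        simp only [pvBal, List.count_cons, Char.reduceEq, reduceIte, Char.reduceBEq,
          if_true, if_false] at hbal ⊢
        push_cast at hbal ⊢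
        omega
      · by_cases h2 : c = '('
        · subst h2
          simp only [pvBal, List.count_cons, Char.reduceEq, reduceIte, Char.reduceBEq,
            if_true, if_false] at hbal ⊢
          push_cast at hbal ⊢
          omega
        · have hb1 : (c == ')') = false := by simp [h1]
          have hb2 : (c == '(') = false := by simp [h2]
          simp only [pvBal, List.count_cons, if_neg h1, if_neg h2, hb1, hb2,
            if_false] at hbal ⊢
          push_cast at hbal ⊢
          omega

-- the inner phase: A's loop from depth d ≥ 1 is B's splitter on the rest of the span
theorem loop_inner (lc : List Char) : ∀ (f : Nat) (ps : List String) (s e d s2 e2 : Int),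
    1 ≤ d → s ≤ e → (0 ≤ s ∨ (e2 ≤ -1 ∧ -(lc.length : Int) ≤ s)) →
    bScan lc 0 e d f = some (s2, e2) →
    aLoop lc ps s e d f =
      ps ++ bSplit [] (PySem.List.slice lc (some s) (some e)) (d - 1)
        (PySem.List.slice lc (some e) (some (e2 - 1))) := by
  intro f
  induction f with
  | zero => intro ps s e d s2 e2 hd hse hr hb; simp [bScan] at hb
  | succ f ih =>
    intro ps s e d s2 e2 hd hse hr hb
    simp only [aLoop]
    simp only [bScan] at hb
    rcases hg : PySem.List.pyGet? lc (if e = 0 then e else e - 1) with _ | g <;>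
      simp only [hg] at hb ⊢
    · simp at hb
    have hng : ¬ (g = ')' ∧ d = 0) := by rintro ⟨-, h2⟩; omega
    simp only [if_neg hng] at hb ⊢
    rcases hc : PySem.List.pyGet? lc e with _ | c <;> simp only [hc] at hb ⊢
    · simp at hb
    obtain ⟨hclo, hchi⟩ := pyGet?_some_range lc e c hc
    by_cases hcp : c = ')'
    · subst hcp
      simp only [Char.reduceEq, reduceIte, if_true, if_false, false_and, and_false, and_true,
        true_and] at hb ⊢
      by_cases hd1 : d = 1
      · subst hd1
        norm_num at hb ⊢
        -- next step exits at e2 = e + 1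
        have hne : ¬ (e + 1 = 0) := by
          rcases hr with h0 | ⟨hneg, -⟩
          · omega
          · have := bScan_ge lc f _ _ _ _ _ hb
            omega
        cases f with
        | zero => simp [bScan] at hb
        | succ f' =>
          simp only [bScan] at hb
          rw [if_neg hne] at hb
          have he1 : e + 1 - 1 = e := by omega
          rw [he1, hc] at hb
          norm_num at hb
          obtain ⟨rfl, rfl⟩ := hb
          simp only [aLoop]
          rw [if_neg hne, he1, hc]
          norm_num
          rw [slice_nil']
          simp [bSplit]
      · -- d ≥ 2
        rw [ih ps s (e + 1) (d - 1) s2 e2 (by omega) (by omega)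
          (hr.elim (fun h0 => Or.inl (by omega)) (fun h => Or.inr ⟨h.1, by omega⟩)) hb]
        have he2 : e + 2 ≤ e2 := by
          have := bScan_ge_succ lc f 0 (e + 1) (d - 1) s2 e2 (by omega) hb
          omega
        have hr2 : (0:Int) ≤ e ∨ e2 - 1 ≤ -1 :=
            hr.elim (fun h0 => Or.inl (by omega)) (fun h => Or.inr (by omega))
        rw [slice_cons' lc e (e2 - 1) ')' hc (by omega) hr2]
        have hsn : (0:Int) ≤ s ∨ (-(lc.length : Int) ≤ s ∧ e ≤ -2) :=
          hr.elim (fun h0 => Or.inl h0) (fun h => Or.inr ⟨h.2, by omega⟩)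
        simp only [bSplit, Char.reduceEq, reduceIte, if_true, if_false]
        rw [← slice_snoc' lc s e ')' hc hse hsn]
    · by_cases hop : c = '('
      · subst hop
        simp only [Char.reduceEq, reduceIte, if_true, if_false, false_and, and_false, and_true,
          true_and] at hb ⊢
        rw [if_neg (by omega : ¬ d = 0)] at hb ⊢
        rw [ih ps s (e + 1) (d + 1) s2 e2 (by omega) (by omega)
          (hr.elim (fun h0 => Or.inl (by omega)) (fun h => Or.inr ⟨h.1, by omega⟩)) hb]
        have he2 : e + 2 ≤ e2 := by
          have := bScan_ge_succ lc f 0 (e + 1) (d + 1) s2 e2 (by omega) hb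
          omega
        have hr2 : (0:Int) ≤ e ∨ e2 - 1 ≤ -1 :=
            hr.elim (fun h0 => Or.inl (by omega)) (fun h => Or.inr (by omega))
        rw [slice_cons' lc e (e2 - 1) '(' hc (by omega) hr2]
        have hsn : (0:Int) ≤ s ∨ (-(lc.length : Int) ≤ s ∧ e ≤ -2) :=
          hr.elim (fun h0 => Or.inl h0) (fun h => Or.inr ⟨h.2, by omega⟩)
        simp only [bSplit, Char.reduceEq, reduceIte, if_true, if_false]
        rw [← slice_snoc' lc s e '(' hc hse hsn]
        congr 2
        omega
      · -- plain character or comma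
        simp only [if_neg hcp, if_neg hop] at hb ⊢
        rw [if_neg (by rintro ⟨h1, -⟩; exact hop h1 : ¬ (c = '(' ∧ d = 0))] at hb
        by_cases hcm : c = ',' ∧ d = 1
        · obtain ⟨rfl, rfl⟩ := hcm
          simp only [Char.reduceEq, reduceIte, if_true, if_false, false_and, and_false,
            and_true, true_and] at hb ⊢
          rw [ih (ps ++ [pvStrip (PySem.List.slice lc (some s) (some e))]) (e + 1) (e + 1) 1
            s2 e2 (by omega) (by omega)
            (hr.elim (fun h0 => Or.inl (by omega))
              (fun h => Or.inr ⟨h.1, by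
                have := bScan_ge lc f _ _ _ _ _ hb
                omega⟩)) hb]
          have he2 : e + 2 ≤ e2 := by
            have := bScan_ge_succ lc f 0 (e + 1) 1 s2 e2 (by omega) hb
            omega
          have hr2 : (0:Int) ≤ e ∨ e2 - 1 ≤ -1 :=
              hr.elim (fun h0 => Or.inl (by omega)) (fun h => Or.inr (by omega))
          rw [slice_cons' lc e (e2 - 1) ',' hc (by omega) hr2]
          rw [slice_nil']
          simp only [bSplit, Char.reduceEq, reduceIte, if_true, if_false, true_and]
          norm_num
          rw [show ([pvStrip (PySem.List.slice lc (some s) (some e))] : List String) =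
            [pvStrip (PySem.List.slice lc (some s) (some e))] ++ [] from by simp]
          rw [bSplit_append]
          simp
        · rw [if_neg (by rintro ⟨h1, h2⟩; exact hcm ⟨h2, h1⟩ : ¬ (d = 1 ∧ c = ','))]
          rw [ih ps s (e + 1) d s2 e2 hd (by omega)
            (hr.elim (fun h0 => Or.inl (by omega)) (fun h => Or.inr ⟨h.1, by omega⟩)) hb]
          have he2 : e + 2 ≤ e2 := by
            have := bScan_ge_succ lc f 0 (e + 1) d s2 e2 (by omega) hb
            omega
          have hr2 : (0:Int) ≤ e ∨ e2 - 1 ≤ -1 :=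
              hr.elim (fun h0 => Or.inl (by omega)) (fun h => Or.inr (by omega))
          rw [slice_cons' lc e (e2 - 1) c hc (by omega) hr2]
          have hnsp : ¬ (c = ',' ∧ d - 1 = 0) := by
            rintro ⟨h1, h2⟩; exact hcm ⟨h1, by omega⟩
          simp only [bSplit, if_neg hop, if_neg hcp, if_neg hnsp]
          have hsn : (0:Int) ≤ s ∨ (-(lc.length : Int) ≤ s ∧ e ≤ -2) :=
            hr.elim (fun h0 => Or.inl h0) (fun h => Or.inr ⟨h.2, by omega⟩)
          rw [← slice_snoc' lc s e c hc hse hsn]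

-- the outer phase: before any top-level '(' the two loops run in lockstep
theorem loop_outer (lc : List Char) : ∀ (f : Nat) (ps : List String) (s e d s2 e2 : Int),
    d ≤ 0 → s ≤ e → (0 ≤ s ∨ e2 ≤ -1) →
    (d = 0 → PySem.List.pyGet? lc (if e = 0 then e else e - 1) ≠ some ')') →
    bScan lc s e d f = some (s2, e2) →
    aLoop lc ps s e d f =
      ps ++ bSplit [] [] 0 (PySem.List.slice lc (some s2) (some (e2 - 1))) := by
  intro f
  induction f with
  | zero => intro ps s e d s2 e2 hd hse hr hne hb; simp [bScan] at hb
  | succ f ih =>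
    intro ps s e d s2 e2 hd hse hr hne hb
    simp only [aLoop]
    simp only [bScan] at hb
    rcases hg : PySem.List.pyGet? lc (if e = 0 then e else e - 1) with _ | g <;>
      simp only [hg] at hb ⊢
    · simp at hb
    have hng : ¬ (g = ')' ∧ d = 0) := by
      rintro ⟨h1, h2⟩; exact hne h2 (h1 ▸ hg)
    simp only [if_neg hng] at hb ⊢
    rcases hc : PySem.List.pyGet? lc e with _ | c <;> simp only [hc] at hb ⊢
    · simp at hb
    obtain ⟨hclo, hchi⟩ := pyGet?_some_range lc e c hc
    have hee : e + 1 ≤ e2 ∨ 0 ≤ e := by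
      rcases hr with h0 | hneg
      · right; omega
      · left
        split_ifs at hb <;> exact bScan_ge lc f _ _ _ _ _ hb
    by_cases hop : c = '('
    · subst hop
      simp only [Char.reduceEq, reduceIte, if_true, if_false, false_and, and_false, and_true,
        true_and] at hb ⊢
      by_cases hd0 : d = 0
      · subst hd0
        simp only [reduceIte] at hb ⊢
        norm_num at hb ⊢
        have hb' := bScan_s_const lc f 0 (e + 1) (e + 1) 1 s2 e2 (by omega)
          (hr.elim (fun h0 => Or.inl (by omega)) (fun h => Or.inr h)) hb
        have hb'' := bScan_s_const lc f (e + 1) (e + 1) (e + 1) 1 s2 e2 (by omega)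
          (hr.elim (fun h0 => Or.inl (by omega)) (fun h => Or.inr h)) hb
        rw [loop_inner lc f ps (e + 1) (e + 1) 1 0 e2 (by omega) (le_refl _)
          (hr.elim (fun h0 => Or.inl (by omega)) (fun hneg => Or.inr ⟨hneg, by omega⟩)) hb']
        have hs2 : s2 = e + 1 := congrArg Prod.fst (Option.some.inj (hb.symm.trans hb''))
        subst hs2
        rw [slice_nil']
        norm_num
      · simp only [if_neg hd0] at hb ⊢
        refine ih ps s (e + 1) (d + 1) s2 e2 (by omega) (by omega) hr ?_ hb
        intro hd1 hcontra
        have hne1 : ¬ (e + 1 = 0) := by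
          rcases hee with h1 | h0
          · rcases hr with h0 | hneg <;> omega
          · omega
        rw [if_neg hne1, show e + 1 - 1 = e from by omega, hc] at hcontra
        exact absurd (Option.some.inj hcontra) (by decide)
    · by_cases hcp : c = ')'
      · subst hcp
        simp only [Char.reduceEq, reduceIte, if_true, if_false, false_and, and_false, and_true,
          true_and] at hb ⊢
        refine ih ps s (e + 1) (d - 1) s2 e2 (by omega) (by omega) hr ?_ hb
        intro hd1
        omega
      · simp only [if_neg hcp, if_neg hop] at hb ⊢
        rw [if_neg (by rintro ⟨h1, -⟩; omega : ¬ (d = 1 ∧ c = ','))]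
        rw [if_neg (by rintro ⟨h1, -⟩; exact hop h1 : ¬ (c = '(' ∧ d = 0))] at hb
        refine ih ps s (e + 1) d s2 e2 hd (by omega) hr ?_ hb
        intro hd0 hcontra
        have hne1 : ¬ (e + 1 = 0) := by
          rcases hee with h1 | h0
          · rcases hr with hr0 | hneg <;> omega
          · omega
        rw [if_neg hne1, show e + 1 - 1 = e from by omega, hc] at hcontra
        exact hcp (Option.some.inj hcontra)

-- ===== VERDICT (by name: the statement is the Claim_ definition above) =====
theorem utils_extract_function_parameters_spec : Claim_equal_utils_extract_function_parameters := by
  intro st code _ hpre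
  unfold Spec_utils_extract_function_parameters
  unfold utils_extract_function_parameters utils_extract_function_parameters_alt
  dsimp only
  set lc := code.toList with hlc
  obtain ⟨F', hF⟩ : ∃ F', lc.length + 1 + (-st).toNat = F' + 1 :=
    ⟨lc.length + (-st).toNat, by omega⟩
  rw [hF]
  rcases hg : PySem.List.pyGet? lc (if st = 0 then st else st - 1) with _ | g
  · -- IndexError evaluating the very first guard: both ports give []
    simp only [aLoop, bScan, hg]
  by_cases hex : g = ')'
  · -- the loop exits at once; Pre_ rules out st = 0 here, so the slice is empty
    subst hex
    have hst0 : st ≠ 0 := by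
      intro h0
      subst h0
      rcases hpre with ⟨h1, -⟩ | ⟨h1, -⟩ | ⟨-, h2, -⟩ | ⟨h1, -⟩
      · omega
      · omega
      · refine absurd ?_ h2
        refine ⟨rfl, ?_⟩
        have hgg := hg
        rw [if_pos rfl] at hgg
        rw [PySem.List.pyGet?_of_nonneg lc (le_refl 0)] at hgg
        simpa using hgg
      · omega
    simp only [aLoop, bScan, hg]
    norm_num
    rw [slice_back_nil lc st hst0]
    simp [bSplit]
  · -- no immediate exit: branch 3 (0 ≤ st) or branch 4 (negative-side exit)
    rcases hb : bScan lc st st 0 (F' + 1) with _ | ⟨s2, e2⟩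
    · rw [aLoop_none lc (F' + 1) [] st st st 0 hb]
    · have hr : (0:Int) ≤ st ∨ e2 ≤ -1 := by
        rcases hpre with ⟨h1, h2⟩ | ⟨h1, h2, h3⟩ | ⟨h1, -⟩ | ⟨h1, hj⟩
        · exfalso
          rw [if_neg (by omega : ¬ st = 0)] at hg
          rw [h2] at hg
          exact hex (Option.some.inj hg).symm
        · exfalso
          rw [if_neg (by omega : ¬ st = 0)] at hg
          rw [← PySem.List.pyGet?_of_nonneg lc (by omega : (0:Int) ≤ st - 1)] at h3
          rw [h3] at hg
          exact hex (Option.some.inj hg).symm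
        · left; exact h1
        · right
          obtain ⟨j, hj1, hj2, hj3, hj4⟩ := hj
          have hfin : (j : Nat) < lc.length := j.isLt
          have hpg : PySem.List.pyGet? lc ((j : Int) + 1 - lc.length - 1) = some ')' := by
            rw [show (j : Int) + 1 - lc.length - 1 = -(((lc.length - (j : Nat) : Nat) : Int)) from
              by push_cast; omega]
            rw [PySem.List.pyGet?_neg_natCast lc (lc.length - (j : Nat)) (by omega) (by omega)]
            rw [show lc.length - (lc.length - (j : Nat)) = (j : Nat) from by omega]
            rw [List.getElem?_eq_getElem hfin]
            exact congrArg some (by simpa using hj3)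
          exact bScan_exit_le lc (F' + 1) st st 0 ((j : Int) + 1 - lc.length) s2 e2
            (le_of_lt hj1) hj2 hpg (by simpa using hj4) hb |>.trans hj2
      rw [loop_outer lc (F' + 1) [] st st 0 s2 e2 (le_refl 0) (le_refl st) hr
        (fun _ h => by rw [hg] at h; exact hex (Option.some.inj h)) hb]
      simp only [hb]
      simp
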